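-- pv_equiv track=rewrite | github.com/zhuyena/TSP-D | TSP-D-GA/code/population.py | environmental_selection
-- ===== SOURCE A (Python) =====
-- def environmental_selection(pop, popsize):
--     sorted_indices = sorted(range(len(pop[1])), key=lambda x: pop[1][x])
--     sorted_value = [pop[1][i] for i in sorted_indices]
--     sorted_solution = [pop[0][i] for i in sorted_indices]
--     sorted_value = sorted_value[:popsize]
--     sorted_solution = sorted_solution[:popsize]
--     pop = [sorted_solution, sorted_value]
--     return pop
-- ===== SOURCE B (Python) =====
-- def environmental_selection(pop, popsize):
--     # Online bounded selection: one pass, keep a sorted list of the best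
--     # (fitness, index) pairs, never more than popsize of them.
--     best = []
--     for i, v in enumerate(pop[1]):
--         j = 0
--         while j < len(best) and best[j] < (v, i):
--             j += 1
--         best.insert(j, (v, i))
--         if len(best) > popsize:
--             best.pop()
--     return [[pop[0][i] for _, i in best], [v for v, _ in best]]
-- ===== Notes on version B (the rewrite author's own statement) =====
-- stated objective: alternative
-- what changed: Replaces the full argsort + two gathers + two slices with a single pass over pop[1] that maintains a sorted buffer of at most popsize best (fitness, index) pairs (bounded online insertion selection), then builds both output lists from that buffer.
-- intended difference: For popsize < 0 with 0 < len(pop[1]) + popsize, A's slice [:popsize] keeps all but the last |popsize| individuals (an artefact of Python negative slicing) while B keeps none ([[], []]), the intended reading of 'keep the best popsize' for a negative popsize. — e.g. on environmental_selection([[[1], [2]], [[5], [3]]], -1): A returns [[[2]], [[3]]], B returns [[], []]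
import Mathlib
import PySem

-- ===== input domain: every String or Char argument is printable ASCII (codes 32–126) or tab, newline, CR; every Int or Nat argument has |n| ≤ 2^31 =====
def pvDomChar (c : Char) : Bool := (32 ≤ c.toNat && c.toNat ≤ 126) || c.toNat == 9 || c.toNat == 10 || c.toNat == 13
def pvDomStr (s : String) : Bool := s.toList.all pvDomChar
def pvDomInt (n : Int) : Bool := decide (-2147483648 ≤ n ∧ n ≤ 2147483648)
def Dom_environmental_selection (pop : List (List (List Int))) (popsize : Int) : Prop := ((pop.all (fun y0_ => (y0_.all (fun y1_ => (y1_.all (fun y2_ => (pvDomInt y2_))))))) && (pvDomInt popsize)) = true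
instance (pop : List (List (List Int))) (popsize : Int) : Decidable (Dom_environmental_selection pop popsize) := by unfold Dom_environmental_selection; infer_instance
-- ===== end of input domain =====

-- B replaces A's full argsort-then-gather-then-slice with a one-pass bounded
-- insertion selection (at most popsize best (fitness, index) pairs are kept);
-- objective: alternative algorithm, same return value except for negative
-- popsize (see D_ below).

-- ===== PORT A =====
def environmental_selection (pop : List (List (List Int))) (popsize : Int) : List (List (List Int)) :=
  let vals := PySem.List.pyGetD pop 1 []          -- pop[1] (Pre_ keeps it in range)
  let sols := PySem.List.pyGetD pop 0 []          -- pop[0]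
  let sorted_indices := PySem.List.sorted (PySem.List.pyRange 0 (PySem.List.len vals) 1)
    (fun x => PySem.List.pyGetD vals x []) false
  let sorted_value := sorted_indices.map (fun i => PySem.List.pyGetD vals i [])
  let sorted_solution := sorted_indices.map (fun i => PySem.List.pyGetD sols i [])
  let sorted_value2 := PySem.List.slice sorted_value none (some popsize)
  let sorted_solution2 := PySem.List.slice sorted_solution none (some popsize)
  [sorted_solution2, sorted_value2]

-- ===== PORT B =====
-- Python tuple comparison (v, i) < (w, j), exact for (list-of-int, int) pairs
def pairLt (a b : List Int × Int) : Bool :=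
  decide (a.1 < b.1) || (decide (a.1 = b.1) && decide (a.2 < b.2))

-- the 'while j < len(best) and best[j] < (v, i): j += 1; best.insert(j, (v, i))' scan
def bInsert (x : List Int × Int) : List (List Int × Int) → List (List Int × Int)
  | [] => [x]
  | y :: ys => if pairLt y x then y :: bInsert x ys else x :: y :: ys

def environmental_selection_alt (pop : List (List (List Int))) (popsize : Int) : List (List (List Int)) :=
  let sols := PySem.List.pyGetD pop 0 []
  let vals := PySem.List.pyGetD pop 1 []
  let best := (PySem.List.enumerate vals 0).foldl
    (fun best iv =>
      let b' := bInsert (iv.2, iv.1) best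
      if popsize < (b'.length : Int) then b'.dropLast else b') []
  [best.map (fun p => PySem.List.pyGetD sols p.2 []), best.map (fun p => p.1)]

-- ===== PRECONDITION & SPEC =====
-- Pre_ = exactly where A returns: pop[1] must exist and pop[0] must be long
-- enough for every index drawn from range(len(pop[1))) (else IndexError).
def Pre_environmental_selection (pop : List (List (List Int))) (popsize : Int) : Prop :=
  2 ≤ pop.length ∧ (pop.getD 1 []).length ≤ (pop.getD 0 []).length
instance (pop : List (List (List Int))) (popsize : Int) : Decidable (Pre_environmental_selection pop popsize) := by unfold Pre_environmental_selection; infer_instance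
def pvWitness_environmental_selection : List (List (List Int)) × Int := ([[[1], [2]], [[5], [3]]], 1)

-- On popsize < 0 with 0 < len(pop[1]) + popsize, A's slice [:popsize] keeps all but
-- the last |popsize| individuals (an artefact of Python's negative slicing), while B
-- keeps none — the intended reading of 'keep the best popsize' for popsize < 0.
def D_environmental_selection (pop : List (List (List Int))) (popsize : Int) : Prop :=
  popsize < 0 ∧ 0 < ((PySem.List.pyGetD pop 1 []).length : Int) + popsize
instance (pop : List (List (List Int))) (popsize : Int) : Decidable (D_environmental_selection pop popsize) := by unfold D_environmental_selection; infer_instance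

def Spec_environmental_selection (pop : List (List (List Int))) (popsize : Int) (out : List (List (List Int))) : Prop := ¬ D_environmental_selection pop popsize → out = environmental_selection_alt pop popsize
instance (pop : List (List (List Int))) (popsize : Int) (out : List (List (List Int))) : Decidable (Spec_environmental_selection pop popsize out) := by unfold Spec_environmental_selection; infer_instance

def pvDiffWitness_environmental_selection : List (List (List Int)) × Int := ([[[1], [2]], [[5], [3]]], -1)
def pvDiffWitnessOut_environmental_selection : (List (List (List Int))) × (List (List (List Int))) := ([[[2]], [[3]]], [[], []])

-- ===== CLAIM (what is proved, stated in full; the proofs are below) =====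
def Claim_unchanged_environmental_selection : Prop := ∀ (pop : List (List (List Int))) (popsize : Int), Dom_environmental_selection pop popsize → Pre_environmental_selection pop popsize → Spec_environmental_selection pop popsize (environmental_selection pop popsize)
def Claim_changed_environmental_selection : Prop := Dom_environmental_selection (pvDiffWitness_environmental_selection.1) (pvDiffWitness_environmental_selection.2) ∧ Pre_environmental_selection (pvDiffWitness_environmental_selection.1) (pvDiffWitness_environmental_selection.2) ∧ D_environmental_selection (pvDiffWitness_environmental_selection.1) (pvDiffWitness_environmental_selection.2) ∧ environmental_selection (pvDiffWitness_environmental_selection.1) (pvDiffWitness_environmental_selection.2) = pvDiffWitnessOut_environmental_selection.1 ∧ environmental_selection_alt (pvDiffWitness_environmental_selection.1) (pvDiffWitness_environmental_selection.2) = pvDiffWitnessOut_environmental_selection.2 ∧ pvDiffWitnessOut_environmental_selection.1 ≠ pvDiffWitnessOut_environmental_selection.2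
def Claim_exact_environmental_selection : Prop := ∀ (pop : List (List (List Int))) (popsize : Int), Dom_environmental_selection pop popsize → Pre_environmental_selection pop popsize → D_environmental_selection pop popsize → environmental_selection pop popsize ≠ environmental_selection_alt pop popsize


-- ===== LEMMAS AND PROOFS =====

-- pair comparison against a strictly larger index is the negated key comparison
lemma pairLt_eq (a b : List Int) (y i : Int) (h : y < i) :
    pairLt (a, y) (b, i) = !decide (b < a) := by
  simp only [pairLt]
  rcases lt_trichotomy a b with h1 | h1 | h1
  · simp [h1, not_lt.2 h1.le]
  · simp [h1, h]
  · have hne : a ≠ b := (h1.ne).symm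
    simp [h1, hne, h1.le]

lemma bInsert_map (vals : List (List Int)) (i : Int) (s : List Int)
    (h : ∀ j ∈ s, j < i) :
    bInsert (PySem.List.pyGetD vals i [], i) (s.map (fun j => (PySem.List.pyGetD vals j [], j)))
      = (PySem.List.insertBy
          (fun a b => decide (PySem.List.pyGetD vals a [] < PySem.List.pyGetD vals b [])) i s).map
          (fun j => (PySem.List.pyGetD vals j [], j)) := by
  induction s with
  | nil => rfl
  | cons y ys ih =>
    have hy : y < i := h y (by simp)
    simp only [List.map_cons, bInsert, PySem.List.insertBy, pairLt_eq _ _ _ _ hy]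
    by_cases hc : PySem.List.pyGetD vals i [] < PySem.List.pyGetD vals y []
    · simp [hc]
    · simp [hc, ih (fun j hj => h j (by simp [hj]))]

lemma length_bInsert (x : List Int × Int) (t : List (List Int × Int)) :
    (bInsert x t).length = t.length + 1 := by
  induction t with
  | nil => rfl
  | cons y ys ih => simp only [bInsert]; split <;> simp [ih]

lemma take_bInsert (x : List Int × Int) (t : List (List Int × Int)) (k : Nat) :
    ((bInsert x (t.take k)).take k) = ((bInsert x t).take k) := by
  induction t generalizing k with
  | nil => simp
  | cons y ys ih =>
    cases k with
    | zero => simp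
    | succ k' =>
      simp only [List.take_succ_cons, bInsert]
      split
      · simp [List.take_succ_cons, ih]
      · cases k' with
        | zero => simp
        | succ m => simp [List.take_succ_cons, List.take_take]

def tstep (popsize : Int) (b : List (List Int × Int)) (x : List Int × Int) :
    List (List Int × Int) :=
  let b' := bInsert x b
  if popsize < (b'.length : Int) then b'.dropLast else b'

lemma trunc_step (popsize : Int) (hp : 0 ≤ popsize) (x : List Int × Int)
    (s : List (List Int × Int)) :
    tstep popsize (s.take popsize.toNat) x = (bInsert x s).take popsize.toNat := by
  have hk : popsize = (popsize.toNat : Int) := (Int.toNat_of_nonneg hp).symm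
  rw [← take_bInsert]
  set L := bInsert x (s.take popsize.toNat) with hL
  have hlen : L.length = (s.take popsize.toNat).length + 1 := length_bInsert x _
  have hle : (s.take popsize.toNat).length ≤ popsize.toNat := List.length_take_le _ _
  simp only [tstep, ← hL]
  split
  · rename_i hgt
    have h1 : popsize.toNat < L.length := by rw [hk] at hgt; exact_mod_cast hgt
    have h2 : L.length = popsize.toNat + 1 := by omega
    rw [List.dropLast_eq_take, h2]
    simp
  · rename_i hng
    have h1 : L.length ≤ popsize.toNat := by rw [hk] at hng; omega
    rw [List.take_of_length_le h1]

lemma foldl_trunc_bridge (vals : List (List Int)) (popsize : Int) (hp : 0 ≤ popsize)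
    (xs : List Int) : ∀ (s : List Int), (∀ j ∈ s, ∀ x ∈ xs, j < x) → xs.Pairwise (· < ·) →
    xs.foldl (fun b i => tstep popsize b (PySem.List.pyGetD vals i [], i))
      ((s.map (fun j => (PySem.List.pyGetD vals j [], j))).take popsize.toNat)
    = ((xs.foldl (fun acc i =>
          PySem.List.insertBy
            (fun a b => decide (PySem.List.pyGetD vals a [] < PySem.List.pyGetD vals b [])) i acc)
        s).map (fun j => (PySem.List.pyGetD vals j [], j))).take popsize.toNat := by
  induction xs with
  | nil => intro s _ _; rfl
  | cons x xs ih =>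
    intro s hs hpw
    rw [List.foldl_cons, List.foldl_cons,
      trunc_step popsize hp, bInsert_map vals x s (fun j hj => hs j hj x (by simp))]
    exact ih _ (fun j hj z hz => by
      rcases (PySem.List.mem_insertBy _ _ _ _).1 hj with h | h
      · exact h ▸ (List.pairwise_cons.1 hpw).1 z hz
      · exact hs j h z (by simp [hz])) (List.pairwise_cons.1 hpw).2

-- for popsize < 0 the bounded buffer stays empty
lemma tstep_nil_neg (popsize : Int) (hn : popsize < 0) (x : List Int × Int) :
    tstep popsize [] x = [] := by
  simp only [tstep, bInsert]
  rw [if_pos (by simpa using by omega : popsize < (([x] : List (List Int × Int)).length : Int))]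
  rfl

lemma foldl_tstep_neg {α : Type} (popsize : Int) (hn : popsize < 0)
    (g : α → List Int × Int) (l : List α) :
    l.foldl (fun b a => tstep popsize b (g a)) [] = [] := by
  induction l with
  | nil => rfl
  | cons x xs ih => rw [List.foldl_cons, tstep_nil_neg popsize hn]; exact ih

lemma slice_neg_nil {α : Type} (xs : List α) (popsize : Int) (hn : popsize < 0)
    (h : (xs.length : Int) + popsize ≤ 0) :
    PySem.List.slice xs none (some popsize) = [] := by
  simp only [PySem.List.slice, PySem.List.clampIdx, if_pos hn]
  split
  · simp
  · have h0 : ((xs.length : Int) + popsize).toNat = 0 := by omega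
    simp [h0]

lemma slice_neg_ne_nil {α : Type} (xs : List α) (popsize : Int) (hn : popsize < 0)
    (h : 0 < (xs.length : Int) + popsize) :
    PySem.List.slice xs none (some popsize) ≠ [] := by
  simp only [PySem.List.slice, PySem.List.clampIdx, if_pos hn]
  split
  · omega
  · simp only [Nat.sub_zero, List.drop_zero, ne_eq, List.take_eq_nil_iff]
    push Not
    constructor
    · omega
    · intro hxs
      rw [hxs] at h
      simp at h
      omega

lemma pairwise_cast_range (n : Nat) :
    (PySem.List.pyRange 0 (n : Int) 1).Pairwise (· < ·) := by
  rw [PySem.List.pyRange_zero_natCast]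
  exact List.pairwise_lt_range.map _ (fun a b h => by exact_mod_cast h)

-- B's buffer after the whole pass, popsize ≥ 0
lemma alt_best_eq (vals : List (List Int)) (popsize : Int) (hp : 0 ≤ popsize) :
    (PySem.List.enumerate vals 0).foldl
      (fun best iv =>
        let b' := bInsert (iv.2, iv.1) best
        if popsize < (b'.length : Int) then b'.dropLast else b') []
    = ((PySem.List.sorted (PySem.List.pyRange 0 (PySem.List.len vals) 1)
          (fun x => PySem.List.pyGetD vals x []) false).map
        (fun j => (PySem.List.pyGetD vals j [], j))).take popsize.toNat := by
  rw [PySem.List.enumerate_eq_map_pyRange vals [], List.foldl_map,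
    PySem.List.sorted_eq_foldl_insertBy]
  have hfun : (fun (x : List (List Int × Int)) (y : Int) =>
      let b' := bInsert ((y, PySem.List.pyGetD vals y []).2, (y, PySem.List.pyGetD vals y []).1) x
      if popsize < (b'.length : Int) then b'.dropLast else b')
    = (fun b i => tstep popsize b (PySem.List.pyGetD vals i [], i)) := rfl
  rw [hfun]
  have h := foldl_trunc_bridge vals popsize hp
    (PySem.List.pyRange 0 (PySem.List.len vals) 1) [] (by simp)
    (pairwise_cast_range vals.length)
  simpa using h

-- ===== VERDICT (by name: the statement is the Claim_ definition above) =====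
theorem environmental_selection_spec : Claim_unchanged_environmental_selection := by
  intro pop popsize _ _ hnD
  simp only [environmental_selection, environmental_selection_alt]
  by_cases hp : 0 ≤ popsize
  · rw [alt_best_eq _ _ hp, PySem.List.slice_to _ hp, PySem.List.slice_to _ hp]
    simp only [List.map_take, List.map_map, List.cons.injEq, and_true]
    exact ⟨rfl, rfl⟩
  · have hn : popsize < 0 := by omega
    have h2 : ((PySem.List.pyGetD pop 1 ([] : List (List Int))).length : Int) + popsize ≤ 0 := by
      by_contra hgt
      exact hnD ⟨hn, by omega⟩
    have hfun2 : (fun (best : List (List Int × Int)) (iv : Int × List Int) =>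
        if popsize < ((bInsert (iv.2, iv.1) best).length : Int)
        then (bInsert (iv.2, iv.1) best).dropLast
        else bInsert (iv.2, iv.1) best)
      = (fun b iv => tstep popsize b (iv.2, iv.1)) := rfl
    rw [hfun2, foldl_tstep_neg popsize hn (fun iv : Int × List Int => (iv.2, iv.1)) _]
    have hslen : ∀ {β : Type} (g : Int → β),
        (List.map g (PySem.List.sorted
          (PySem.List.pyRange 0 (PySem.List.len (PySem.List.pyGetD pop 1 [])))
          (fun x => PySem.List.pyGetD (PySem.List.pyGetD pop 1 []) x []) false)).length
        = (PySem.List.pyGetD pop 1 ([] : List (List Int))).length := by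
      intro β g
      simp [PySem.List.len, PySem.List.length_sorted, PySem.List.pyRange_zero_natCast]
    rw [slice_neg_nil _ _ hn (by rw [hslen]; exact h2),
      slice_neg_nil _ _ hn (by rw [hslen]; exact h2)]
    simp
theorem environmental_selection_changed : Claim_changed_environmental_selection := by
  unfold Claim_changed_environmental_selection; decide
theorem environmental_selection_tight : Claim_exact_environmental_selection := by
  intro pop popsize _ _ hD heq
  unfold D_environmental_selection at hD
  obtain ⟨hn, hpos⟩ := hD
  have hB : environmental_selection_alt pop popsize = [[], []] := by
    simp only [environmental_selection_alt]
    have hfun2 : (fun (best : List (List Int × Int)) (iv : Int × List Int) =>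
        if popsize < ((bInsert (iv.2, iv.1) best).length : Int)
        then (bInsert (iv.2, iv.1) best).dropLast
        else bInsert (iv.2, iv.1) best)
      = (fun b iv => tstep popsize b (iv.2, iv.1)) := rfl
    rw [hfun2, foldl_tstep_neg popsize hn (fun iv : Int × List Int => (iv.2, iv.1)) _]
    simp
  rw [hB] at heq
  simp only [environmental_selection] at heq
  have h1 := (List.cons_eq_cons.1 heq).1
  exact slice_neg_ne_nil _ _ hn (by
    simp [PySem.List.len, PySem.List.length_sorted, PySem.List.pyRange_zero_natCast]
    omega) h1
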